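-- pv_equiv track=rewrite | github.com/shuqi-mo/demo1 | backend/executer.py | calculate_event_result
-- ===== SOURCE A (Python) =====
-- def calculate_event_result(must_arrays, maybe_arrays, no_arrays):
--     # 检查所有数组是否为空
--     if not must_arrays and not maybe_arrays and not no_arrays:
--         return []
--
--     # 确保输入的数组长度一致，如果数组非空
--     if must_arrays:
--         array_length = len(must_arrays[0])
--     elif maybe_arrays:
--         array_length = len(maybe_arrays[0])
--     elif no_arrays:
--         array_length = len(no_arrays[0])
--     else:
--         return []
--
--     # 确保所有数组长度一致
--     assert all(len(array) == array_length for array in must_arrays + maybe_arrays + no_arrays), "Arrays must have the same length"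
--
--     # 计算所有must状态数组的交集
--     must_result = set(range(array_length))
--     for array in must_arrays:
--         must_result = must_result.intersection(set([i for i, value in enumerate(array) if value == 1]))
--
--     # 计算所有maybe状态数组的并集
--     maybe_result = set() if maybe_arrays else set(range(array_length))
--     for array in maybe_arrays:
--         maybe_result.update(set([i for i, value in enumerate(array) if value == 1]))
--
--     # 计算所有no状态数组的并集
--     no_result = set()
--     for array in no_arrays:
--         no_result.update(set([i for i, value in enumerate(array) if value == 1]))
--
--     # 让交集和并集再相交一次得到最终结果，并排除no_result中的位置
--     final_result = list(must_result.intersection(maybe_result) - no_result)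
--
--     # 将结果转换为一维数组形式
--     final_array = [0] * array_length
--     for index in final_result:
--         final_array[index] = 1
--
--     return final_array
-- ===== SOURCE B (Python) =====
-- def calculate_event_result(must_arrays, maybe_arrays, no_arrays):
--     if not must_arrays and not maybe_arrays and not no_arrays:
--         return []
--     if must_arrays:
--         array_length = len(must_arrays[0])
--     elif maybe_arrays:
--         array_length = len(maybe_arrays[0])
--     else:
--         array_length = len(no_arrays[0])
--     assert all(len(array) == array_length for array in must_arrays + maybe_arrays + no_arrays), "Arrays must have the same length"
--     final_array = []
--     for i in range(array_length):
--         must_ok = all(a[i] == 1 for a in must_arrays)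
--         maybe_ok = (not maybe_arrays) or any(a[i] == 1 for a in maybe_arrays)
--         no_bad = any(a[i] == 1 for a in no_arrays)
--         final_array.append(1 if must_ok and maybe_ok and not no_bad else 0)
--     return final_array
-- ===== Notes on version B (the rewrite author's own statement) =====
-- stated objective: simpler
-- what changed: Replaces the index-set algebra (intersection of must index-sets, union of maybe/no index-sets, set difference, then scatter into the output) by a single per-position scan that decides each output bit directly with all/any over the arrays.
import Mathlib
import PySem

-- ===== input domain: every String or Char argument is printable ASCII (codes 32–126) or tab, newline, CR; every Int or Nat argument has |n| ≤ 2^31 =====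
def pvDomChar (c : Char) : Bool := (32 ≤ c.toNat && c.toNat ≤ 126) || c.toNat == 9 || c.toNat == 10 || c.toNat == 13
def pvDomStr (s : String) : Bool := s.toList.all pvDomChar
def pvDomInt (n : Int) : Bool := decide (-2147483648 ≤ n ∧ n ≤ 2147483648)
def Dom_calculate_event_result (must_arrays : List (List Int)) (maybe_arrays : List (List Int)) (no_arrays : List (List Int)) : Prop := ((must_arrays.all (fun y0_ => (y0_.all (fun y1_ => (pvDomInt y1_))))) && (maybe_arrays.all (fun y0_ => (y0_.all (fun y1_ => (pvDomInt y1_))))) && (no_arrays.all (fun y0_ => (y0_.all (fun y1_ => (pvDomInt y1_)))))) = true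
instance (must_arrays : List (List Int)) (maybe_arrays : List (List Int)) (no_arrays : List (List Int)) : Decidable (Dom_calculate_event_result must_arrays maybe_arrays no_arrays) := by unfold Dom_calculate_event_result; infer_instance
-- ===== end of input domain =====

-- B replaces A's index-set algebra (intersections/unions/difference of index sets, then a scatter
-- into the output array) by a single per-position scan deciding each output bit with all/any: simpler.


-- ===== PORT A =====
-- set([i for i, value in enumerate(array) if value == 1])
def pvOnes (arr : List Int) : PySem.Set Int :=
  PySem.Set.ofList ((PySem.List.enumerate arr).filterMap (fun p => if p.2 = 1 then some p.1 else none))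

-- The assert is not modelled: Pre_ excludes exactly the inputs on which it fails (A raises there).
-- The final 'for index in final_result' loop consumes a Python set; its output does not depend on
-- the iteration order (each visited index is independently set to 1), so folding over the Set's
-- list is exact.
def calculate_event_result (must_arrays : List (List Int)) (maybe_arrays : List (List Int)) (no_arrays : List (List Int)) : List Int :=
  if must_arrays = [] ∧ maybe_arrays = [] ∧ no_arrays = [] then []
  else
    let array_length : Nat :=
      if must_arrays ≠ [] then (must_arrays.headD []).length
      else if maybe_arrays ≠ [] then (maybe_arrays.headD []).length
      else (no_arrays.headD []).length
    let must_result := must_arrays.foldl (fun s a => PySem.Set.inter s (pvOnes a))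
        (PySem.Set.ofList (PySem.List.pyRange 0 (array_length : Int) 1))
    let maybe_result := maybe_arrays.foldl (fun s a => PySem.Set.update s (pvOnes a))
        (if maybe_arrays = [] then PySem.Set.ofList (PySem.List.pyRange 0 (array_length : Int) 1) else PySem.Set.empty)
    let no_result := no_arrays.foldl (fun s a => PySem.Set.update s (pvOnes a)) PySem.Set.empty
    let final_result : List Int := PySem.Set.diff (PySem.Set.inter must_result maybe_result) no_result
    final_result.foldl (fun arr i => PySem.List.pySetD arr i 1) (List.replicate array_length (0 : Int))

-- ===== PORT B =====
def calculate_event_result_alt (must_arrays : List (List Int)) (maybe_arrays : List (List Int)) (no_arrays : List (List Int)) : List Int :=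
  if must_arrays = [] ∧ maybe_arrays = [] ∧ no_arrays = [] then []
  else
    let array_length : Nat :=
      if must_arrays ≠ [] then (must_arrays.headD []).length
      else if maybe_arrays ≠ [] then (maybe_arrays.headD []).length
      else (no_arrays.headD []).length
    (PySem.List.pyRange 0 (array_length : Int) 1).map (fun i =>
      let must_ok := must_arrays.all (fun a => PySem.List.pyGetD a i 0 == 1)
      let maybe_ok := maybe_arrays.isEmpty || maybe_arrays.any (fun a => PySem.List.pyGetD a i 0 == 1)
      let no_bad := no_arrays.any (fun a => PySem.List.pyGetD a i 0 == 1)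
      if must_ok && maybe_ok && !no_bad then (1 : Int) else 0)

-- ===== PRECONDITION & SPEC =====
-- Pre_ excludes exactly the inputs on which A's assert fails (all arrays must have one length):
-- Python A raises AssertionError there.
def Pre_calculate_event_result (must_arrays : List (List Int)) (maybe_arrays : List (List Int)) (no_arrays : List (List Int)) : Prop :=
  ∀ a ∈ must_arrays ++ maybe_arrays ++ no_arrays, ∀ b ∈ must_arrays ++ maybe_arrays ++ no_arrays, a.length = b.length
instance (must_arrays : List (List Int)) (maybe_arrays : List (List Int)) (no_arrays : List (List Int)) : Decidable (Pre_calculate_event_result must_arrays maybe_arrays no_arrays) := by unfold Pre_calculate_event_result; infer_instance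

def pvWitness_calculate_event_result : List (List Int) × List (List Int) × List (List Int) :=
  ([[1, 0]], [[0, 1], [1, 1]], [[0, 0]])

def Spec_calculate_event_result (must_arrays : List (List Int)) (maybe_arrays : List (List Int)) (no_arrays : List (List Int)) (out : List Int) : Prop := out = calculate_event_result_alt must_arrays maybe_arrays no_arrays
instance (must_arrays : List (List Int)) (maybe_arrays : List (List Int)) (no_arrays : List (List Int)) (out : List Int) : Decidable (Spec_calculate_event_result must_arrays maybe_arrays no_arrays out) := by unfold Spec_calculate_event_result; infer_instance

-- ===== CLAIM (what is proved, stated in full; the proofs are below) =====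
def Claim_equal_calculate_event_result : Prop := ∀ (must_arrays : List (List Int)) (maybe_arrays : List (List Int)) (no_arrays : List (List Int)), Dom_calculate_event_result must_arrays maybe_arrays no_arrays → Pre_calculate_event_result must_arrays maybe_arrays no_arrays → Spec_calculate_event_result must_arrays maybe_arrays no_arrays (calculate_event_result must_arrays maybe_arrays no_arrays)

-- ===== LEMMAS AND PROOFS =====

-- membership in the per-array index set
theorem mem_pvOnes {arr : List Int} {i : Int} :
    i ∈ pvOnes arr ↔ ∃ (k : Nat) (_ : k < arr.length), i = (k : Int) ∧ arr[k] = 1 := by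
  simp only [pvOnes, PySem.Set.mem_ofList, List.mem_filterMap]
  constructor
  · rintro ⟨p, hp, hsome⟩
    rcases (PySem.List.mem_enumerate_iff _ _ _).1 hp with ⟨k, hk, rfl⟩
    by_cases h1 : arr[k] = 1
    · exact ⟨k, hk, by simpa [h1] using hsome.symm, h1⟩
    · simp [h1] at hsome
  · rintro ⟨k, hk, rfl, h1⟩
    exact ⟨((k : Int), arr[k]), (PySem.List.mem_enumerate_iff _ _ _).2 ⟨k, hk, by simp⟩, by simp [h1]⟩

-- fold of intersections
theorem mem_foldl_inter (l : List (List Int)) (s : PySem.Set Int) (i : Int) :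
    i ∈ l.foldl (fun s a => PySem.Set.inter s (pvOnes a)) s ↔ i ∈ s ∧ ∀ a ∈ l, i ∈ pvOnes a := by
  induction l generalizing s with
  | nil => simp
  | cons x xs ih =>
      simp only [List.foldl_cons, ih, PySem.Set.mem_inter, List.mem_cons]
      constructor
      · rintro ⟨⟨hs, hx⟩, hall⟩
        exact ⟨hs, fun a ha => by rcases ha with rfl | ha; exact hx; exact hall a ha⟩
      · rintro ⟨hs, hall⟩
        exact ⟨⟨hs, hall x (Or.inl rfl)⟩, fun a ha => hall a (Or.inr ha)⟩

-- fold of unions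
theorem mem_foldl_update (l : List (List Int)) (s : PySem.Set Int) (i : Int) :
    i ∈ l.foldl (fun s a => PySem.Set.update s (pvOnes a)) s ↔ i ∈ s ∨ ∃ a ∈ l, i ∈ pvOnes a := by
  induction l generalizing s with
  | nil => simp
  | cons x xs ih =>
      simp [List.foldl_cons, ih, PySem.Set.mem_update]
      tauto

-- the scatter loop: getElem? of the folded array
theorem getElem?_foldl_pySetD (L : List Int) (init : List Int) (k : Nat)
    (hL : ∀ j ∈ L, 0 ≤ j) :
    (L.foldl (fun arr i => PySem.List.pySetD arr i (1 : Int)) init)[k]? =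
      if (k : Int) ∈ L ∧ k < init.length then some 1 else init[k]? := by
  induction L generalizing init with
  | nil => simp
  | cons x xs ih =>
      have hx : (0 : Int) ≤ x := hL x (List.mem_cons_self)
      simp only [List.foldl_cons]
      rw [PySem.List.pySetD_of_nonneg init 1 hx,
        ih _ (fun j hj => hL j (List.mem_cons_of_mem _ hj))]
      by_cases hkl : k < init.length
      · by_cases hkx : (k : Int) = x
        · have hxk : x.toNat = k := by omega
          simp [hxk, hkl, hkx]
        · have hne : x.toNat ≠ k := by omega
          simp only [List.length_set, List.getElem?_set, if_neg hne, List.mem_cons]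
          have : ((k : Int) = x ∨ (k : Int) ∈ xs) ↔ (k : Int) ∈ xs := by tauto
          simp [hkl, this]
      · have h2 : (init.set x.toNat 1)[k]? = none :=
          List.getElem?_eq_none (by simp; omega)
        simp only [List.length_set, h2, List.mem_cons]
        rw [if_neg (by omega), if_neg (by omega),
          List.getElem?_eq_none (by omega : init.length ≤ k)]

-- characterisation of pvOnes at an in-range natural index
theorem mem_pvOnes_of_lt {a : List Int} {k : Nat} (hk : k < a.length) :
    ((k : Int) ∈ pvOnes a ↔ a[k] = 1) := by
  rw [mem_pvOnes]
  constructor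
  · rintro ⟨k', hk', hkk, h1⟩
    have : k' = k := by omega
    subst this; exact h1
  · intro h1; exact ⟨k, hk, rfl, h1⟩

-- ===== VERDICT (by name: the statement is the Claim_ definition above) =====
theorem calculate_event_result_spec : Claim_equal_calculate_event_result := by
  intro m mb no _ hpre
  unfold Spec_calculate_event_result
  by_cases hE : m = [] ∧ mb = [] ∧ no = []
  · simp [calculate_event_result, calculate_event_result_alt, hE]
  · simp only [calculate_event_result, calculate_event_result_alt, if_neg hE]
    set n : Nat :=
      (if m ≠ [] then (m.headD []).length
       else if mb ≠ [] then (mb.headD []).length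
       else (no.headD []).length) with hn
    -- every array in the input has length n
    have hhead : ∃ r ∈ m ++ mb ++ no, r.length = n := by
      rcases m with _ | ⟨a, m'⟩
      · rcases mb with _ | ⟨b, mb'⟩
        · rcases no with _ | ⟨c, no'⟩
          · simp at hE
          · exact ⟨c, by simp, by simp [hn]⟩
        · exact ⟨b, by simp, by simp [hn]⟩
      · exact ⟨a, by simp, by simp [hn]⟩
    obtain ⟨r, hr, hrn⟩ := hhead
    have hall : ∀ a ∈ m ++ mb ++ no, a.length = n := fun a ha =>
      (hpre a ha r hr).trans hrn
    -- elementwise comparison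
    apply List.ext_getElem?
    intro k
    have hmustlem : ∀ i : Int,
        i ∈ m.foldl (fun s a => PySem.Set.inter s (pvOnes a))
            (PySem.Set.ofList (PySem.List.pyRange 0 (n : Int) 1)) ↔
          (0 ≤ i ∧ i < (n : Int)) ∧ ∀ a ∈ m, i ∈ pvOnes a := by
      intro i
      rw [mem_foldl_inter]
      simp [PySem.Set.mem_ofList, PySem.List.mem_pyRange_one]
    have hL : ∀ j ∈ (PySem.Set.diff
        (PySem.Set.inter
          (m.foldl (fun s a => PySem.Set.inter s (pvOnes a))
            (PySem.Set.ofList (PySem.List.pyRange 0 (n : Int) 1)))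
          (mb.foldl (fun s a => PySem.Set.update s (pvOnes a))
            (if mb = [] then PySem.Set.ofList (PySem.List.pyRange 0 (n : Int) 1)
             else PySem.Set.empty)))
        (no.foldl (fun s a => PySem.Set.update s (pvOnes a)) PySem.Set.empty) : List Int),
        0 ≤ j := by
      intro j hj
      have := ((PySem.Set.mem_inter _ _ _).1 ((PySem.Set.mem_diff _ _ _).1 hj).1).1
      exact ((hmustlem j).1 this).1.1
    have hrange : (PySem.List.pyRange 0 (n : Int) 1)[k]? =
        if k < n then some ((k : Int)) else none := by
      rw [PySem.List.pyRange_zero_natCast, List.getElem?_map]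
      by_cases hk : k < n
      · simp [hk]
      · simp [hk]
    rw [getElem?_foldl_pySetD _ _ _ hL, List.getElem?_map, hrange,
      List.length_replicate]
    by_cases hk : k < n
    · rw [if_pos hk]
      -- per-array value facts at index k
      have hval : ∀ a ∈ m ++ mb ++ no,
          ((k : Int) ∈ pvOnes a ↔ PySem.List.pyGetD a (k : Int) 0 == 1) := by
        intro a ha
        have hlen : k < a.length := by rw [hall a ha]; exact hk
        rw [mem_pvOnes_of_lt hlen, PySem.List.pyGetD_natCast,
          List.getD_eq_getElem _ _ hlen]
        simp
      have h1 : (∀ a ∈ m, (k : Int) ∈ pvOnes a) ↔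
          m.all (fun a => PySem.List.pyGetD a (k : Int) 0 == 1) = true := by
        simp only [List.all_eq_true]
        exact ⟨fun h a ha => (hval a (by simp [ha])).1 (h a ha),
          fun h a ha => (hval a (by simp [ha])).2 (h a ha)⟩
      have h2 : ((k : Int) ∈ mb.foldl (fun s a => PySem.Set.update s (pvOnes a))
            (if mb = [] then PySem.Set.ofList (PySem.List.pyRange 0 (n : Int) 1)
             else PySem.Set.empty)) ↔
          (mb.isEmpty || mb.any (fun a => PySem.List.pyGetD a (k : Int) 0 == 1)) = true := by
        rw [mem_foldl_update]
        rcases mb with _ | ⟨b, mb'⟩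
        · simp [PySem.Set.mem_ofList, PySem.List.mem_pyRange_one]
          exact_mod_cast hk
        · simp only [if_neg (by simp : ¬ (b :: mb' = [])), PySem.Set.empty,
            List.not_mem_nil, false_or, List.isEmpty_cons, Bool.false_or,
            List.any_eq_true]
          exact ⟨fun ⟨a, ha, h⟩ => ⟨a, ha,
              (hval a (by simp only [List.mem_append]; exact Or.inl (Or.inr ha))).1 h⟩,
            fun ⟨a, ha, h⟩ => ⟨a, ha,
              (hval a (by simp only [List.mem_append]; exact Or.inl (Or.inr ha))).2 h⟩⟩
      have h3 : ((k : Int) ∈ no.foldl (fun s a => PySem.Set.update s (pvOnes a))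
            PySem.Set.empty) ↔
          no.any (fun a => PySem.List.pyGetD a (k : Int) 0 == 1) = true := by
        rw [mem_foldl_update]
        simp only [PySem.Set.empty, List.not_mem_nil, false_or, List.any_eq_true]
        exact ⟨fun ⟨a, ha, h⟩ => ⟨a, ha, (hval a (by simp [ha])).1 h⟩,
          fun ⟨a, ha, h⟩ => ⟨a, ha, (hval a (by simp [ha])).2 h⟩⟩
      have hmem : ((k : Int) ∈ PySem.Set.diff
          (PySem.Set.inter
            (m.foldl (fun s a => PySem.Set.inter s (pvOnes a))
              (PySem.Set.ofList (PySem.List.pyRange 0 (n : Int) 1)))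
            (mb.foldl (fun s a => PySem.Set.update s (pvOnes a))
              (if mb = [] then PySem.Set.ofList (PySem.List.pyRange 0 (n : Int) 1)
               else PySem.Set.empty)))
          (no.foldl (fun s a => PySem.Set.update s (pvOnes a)) PySem.Set.empty)) ↔
          (m.all (fun a => PySem.List.pyGetD a (k : Int) 0 == 1) = true ∧
           (mb.isEmpty || mb.any (fun a => PySem.List.pyGetD a (k : Int) 0 == 1)) = true ∧
           ¬ no.any (fun a => PySem.List.pyGetD a (k : Int) 0 == 1) = true) := by
        rw [PySem.Set.mem_diff, PySem.Set.mem_inter, hmustlem, h2, h3]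
        constructor
        · rintro ⟨⟨⟨-, hm⟩, hmb⟩, hno'⟩
          exact ⟨h1.1 hm, hmb, hno'⟩
        · rintro ⟨hm, hmb, hno'⟩
          exact ⟨⟨⟨⟨by positivity, by exact_mod_cast hk⟩, h1.2 hm⟩, hmb⟩, hno'⟩
      by_cases hin : (k : Int) ∈ PySem.Set.diff
          (PySem.Set.inter
            (m.foldl (fun s a => PySem.Set.inter s (pvOnes a))
              (PySem.Set.ofList (PySem.List.pyRange 0 (n : Int) 1)))
            (mb.foldl (fun s a => PySem.Set.update s (pvOnes a))
              (if mb = [] then PySem.Set.ofList (PySem.List.pyRange 0 (n : Int) 1)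
               else PySem.Set.empty)))
          (no.foldl (fun s a => PySem.Set.update s (pvOnes a)) PySem.Set.empty)
      · obtain ⟨ha, hb, hc⟩ := hmem.1 hin
        have hc' : no.any (fun a => PySem.List.pyGetD a (k : Int) 0 == 1) = false := by
          revert hc; cases no.any (fun a => PySem.List.pyGetD a (k : Int) 0 == 1) <;> simp
        rw [if_pos ⟨hin, hk⟩, Option.map_some]
        simp only [ha, hb, hc', Bool.not_false, Bool.and_true, if_true]
      · have hnot := fun h => hin (hmem.2 h)
        rw [if_neg (by tauto),
          show (List.replicate n (0 : Int))[k]? = some 0 by simp [hk],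
          Option.map_some]
        have hfalse : (m.all (fun a => PySem.List.pyGetD a (k : Int) 0 == 1) &&
            ((mb.isEmpty || mb.any (fun a => PySem.List.pyGetD a (k : Int) 0 == 1)) &&
             !(no.any (fun a => PySem.List.pyGetD a (k : Int) 0 == 1)))) = false := by
          apply Bool.eq_false_iff.2
          intro hcontra
          apply hnot
          rw [Bool.and_eq_true, Bool.and_eq_true, Bool.not_eq_true'] at hcontra
          obtain ⟨ha', hb', hc'⟩ := hcontra
          exact ⟨ha', hb', by rw [hc']; exact Bool.false_ne_true⟩
        simp only [Bool.and_assoc, hfalse, Bool.false_eq_true, if_false]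
    · rw [if_neg hk, Option.map_none,
        show (List.replicate n (0 : Int))[k]? = none by simp; omega]
      rw [if_neg (by omega)]
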